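-- pv_equiv track=rewrite | github.com/Trifase/advent-of-code | archive/2017/4/__main__.py | is_really_valid
-- ===== SOURCE A (Python) =====
-- def is_really_valid(lista):
--     for word in lista:
--         for word2 in lista:
--             set1 = {c for c in word}
--             set2 = {c for c in word2}
--             if word != word2:
--                 if set1 == set2:
--                     return False
--             else:
--                 continue
--     return True
-- ===== SOURCE B (Python) =====
-- def is_really_valid(lista):
--     seen = {}
--     for word in lista:
--         key = tuple(sorted(set(word)))
--         hit = seen.get(key)
--         if hit is None:
--             seen[key] = word
--         elif hit != word:
--             return False
--     return True
-- ===== Notes on version B (the rewrite author's own statement) =====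
-- stated objective: faster
-- what changed: Replaces the quadratic all-pairs scan with one pass over the list using a dictionary keyed by each word's sorted distinct-character tuple, returning False on the first key whose stored word differs.
import Mathlib
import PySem

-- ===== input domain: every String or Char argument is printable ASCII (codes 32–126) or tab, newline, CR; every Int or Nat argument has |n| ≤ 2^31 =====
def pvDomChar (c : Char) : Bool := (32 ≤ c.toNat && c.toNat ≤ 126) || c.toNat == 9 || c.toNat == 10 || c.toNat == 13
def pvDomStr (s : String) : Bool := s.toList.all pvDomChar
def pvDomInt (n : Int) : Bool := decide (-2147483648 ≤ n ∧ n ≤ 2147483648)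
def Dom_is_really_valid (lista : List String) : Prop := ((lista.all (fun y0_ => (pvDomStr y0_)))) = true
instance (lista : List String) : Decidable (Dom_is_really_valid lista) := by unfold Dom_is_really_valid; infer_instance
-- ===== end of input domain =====

-- B replaces A's quadratic all-pairs scan with one pass keyed by each word's sorted distinct-character list (faster).

-- ===== PORT A =====
-- {c for c in word}
def pvCharSetA (word : String) : PySem.Set Char := PySem.Set.ofList word.toList

-- inner 'for word2 in lista' loop; false = early 'return False'
def pvInnerA (word : String) : List String → Bool
  | [] => true
  | word2 :: rest =>
    if word ≠ word2 then
      if PySem.Set.equal (pvCharSetA word) (pvCharSetA word2) then false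
      else pvInnerA word rest
    else pvInnerA word rest

-- outer 'for word in lista' loop over the same full list
def pvOuterA (full : List String) : List String → Bool
  | [] => true
  | word :: rest => pvInnerA word full && pvOuterA full rest

def is_really_valid (lista : List String) : Bool := pvOuterA lista lista

-- ===== PORT B =====
-- tuple(sorted(set(word)))
def pvKeyB (word : String) : List Char :=
  PySem.List.sorted (PySem.Set.ofList word.toList) (fun x => x) false

-- the single pass with the 'seen' dict; false = early 'return False'
def pvScanB (seen : PySem.Dict (List Char) String) : List String → Bool
  | [] => true
  | word :: rest =>
    match seen.get? (pvKeyB word) with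
    | none => pvScanB (seen.insert (pvKeyB word) word) rest
    | some hit => if hit ≠ word then false else pvScanB seen rest

def is_really_valid_alt (lista : List String) : Bool := pvScanB PySem.Dict.empty lista

-- ===== PRECONDITION & SPEC =====
def Spec_is_really_valid (lista : List String) (out : Bool) : Prop := out = is_really_valid_alt lista
instance (lista : List String) (out : Bool) : Decidable (Spec_is_really_valid lista out) := by unfold Spec_is_really_valid; infer_instance

-- ===== CLAIM (what is proved, stated in full; the proofs are below) =====
def Claim_equal_is_really_valid : Prop := ∀ (lista : List String), Dom_is_really_valid lista → Spec_is_really_valid lista (is_really_valid lista)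

-- ===== LEMMAS AND PROOFS =====

-- set equality of the character sets is exactly equality of the canonical sorted keys
lemma equal_iff_key (w w2 : String) :
    PySem.Set.equal (pvCharSetA w) (pvCharSetA w2) = true ↔ pvKeyB w = pvKeyB w2 := by
  constructor
  · intro h
    have hmem := (PySem.Set.equal_iff _ _).mp h
    have hperm : (pvCharSetA w : List Char).Perm (pvCharSetA w2) :=
      (List.perm_ext_iff_of_nodup (PySem.Set.nodup_ofList _) (PySem.Set.nodup_ofList _)).mpr hmem
    exact PySem.List.sorted_eq_sorted_of_perm _ _ _ (fun a b h => h) hperm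
  · intro h
    apply (PySem.Set.equal_iff _ _).mpr
    have p1 : (pvKeyB w).Perm (pvCharSetA w) := PySem.List.sorted_perm _ _ _
    have p2 : (pvKeyB w2).Perm (pvCharSetA w2) := PySem.List.sorted_perm _ _ _
    intro x
    constructor
    · intro hx; exact p2.mem_iff.mp (h ▸ p1.symm.mem_iff.mp hx)
    · intro hx; exact p1.mem_iff.mp (h ▸ p2.symm.mem_iff.mp hx)

lemma innerA_iff (word : String) (l : List String) :
    pvInnerA word l = true ↔ ∀ w2 ∈ l, word = w2 ∨ pvKeyB word ≠ pvKeyB w2 := by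
  induction l with
  | nil => simp [pvInnerA]
  | cons w2 rest ih =>
    by_cases hne : word = w2
    · subst hne
      simp only [pvInnerA, List.mem_cons]
      rw [if_neg (fun h : word ≠ word => h rfl), ih]
      constructor
      · intro h a ha
        rcases ha with ha | ha
        · exact Or.inl ha.symm
        · exact h a ha
      · intro h a ha; exact h a (Or.inr ha)
    · by_cases heq : PySem.Set.equal (pvCharSetA word) (pvCharSetA w2) = true
      · have hk := (equal_iff_key word w2).mp heq
        simp only [pvInnerA, if_pos hne, if_pos heq, List.mem_cons]
        constructor
        · intro h; cases h
        · intro h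
          rcases h w2 (Or.inl rfl) with he | hkne
          · exact absurd he hne
          · exact absurd hk hkne
      · have hkne : pvKeyB word ≠ pvKeyB w2 := fun h => heq ((equal_iff_key word w2).mpr h)
        simp only [pvInnerA, if_pos hne, if_neg heq, List.mem_cons]
        rw [ih]
        constructor
        · intro h a ha
          rcases ha with ha | ha
          · exact ha ▸ Or.inr hkne
          · exact h a ha
        · intro h a ha; exact h a (Or.inr ha)

lemma outerA_iff (full l : List String) :
    pvOuterA full l = true ↔ ∀ w ∈ l, pvInnerA w full = true := by
  induction l with
  | nil => simp [pvOuterA]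
  | cons w rest ih => simp [pvOuterA, ih, Bool.and_eq_true]

lemma A_iff (lista : List String) :
    is_really_valid lista = true ↔
      ∀ w ∈ lista, ∀ w2 ∈ lista, w = w2 ∨ pvKeyB w ≠ pvKeyB w2 := by
  unfold is_really_valid
  rw [outerA_iff]
  constructor
  · intro h w hw; exact (innerA_iff w lista).mp (h w hw)
  · intro h w hw; exact (innerA_iff w lista).mpr (h w hw)

lemma scanB_iff (rest : List String) :
    ∀ (pre : List String) (seen : PySem.Dict (List Char) String),
    (∀ w ∈ pre, seen.get? (pvKeyB w) = some w) →
    (∀ k v, seen.get? k = some v → pvKeyB v = k ∧ v ∈ pre) →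
    (pvScanB seen rest = true ↔
      ∀ w ∈ rest, ∀ w2, (w2 ∈ pre ∨ w2 ∈ rest) → w = w2 ∨ pvKeyB w ≠ pvKeyB w2) := by
  induction rest with
  | nil => intro pre seen h1 h2; simp [pvScanB]
  | cons word rest ih =>
    intro pre seen h1 h2
    simp only [pvScanB]
    cases hget : seen.get? (pvKeyB word) with
    | none =>
      show pvScanB (seen.insert (pvKeyB word) word) rest = true ↔ _
      have hfresh : ∀ w2 ∈ pre, pvKeyB word ≠ pvKeyB w2 := by
        intro w2 hw2 hk
        have hx := h1 w2 hw2
        rw [← hk, hget] at hx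
        cases hx
      have h1' : ∀ w ∈ pre ++ [word],
          (seen.insert (pvKeyB word) word).get? (pvKeyB w) = some w := by
        intro w hw
        rcases List.mem_append.mp hw with hw | hw
        · rw [PySem.Dict.get?_insert, if_neg (fun h => hfresh w hw h.symm)]
          exact h1 w hw
        · simp only [List.mem_singleton] at hw
          subst hw
          rw [PySem.Dict.get?_insert, if_pos rfl]
      have h2' : ∀ k v, (seen.insert (pvKeyB word) word).get? k = some v →
          pvKeyB v = k ∧ v ∈ pre ++ [word] := by
        intro k v hv
        rw [PySem.Dict.get?_insert] at hv
        by_cases hk : k = pvKeyB word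
        · rw [if_pos hk] at hv
          cases hv
          exact ⟨hk.symm, by simp⟩
        · rw [if_neg hk] at hv
          obtain ⟨hkk, hmem⟩ := h2 k v hv
          exact ⟨hkk, List.mem_append.mpr (Or.inl hmem)⟩
      rw [ih (pre ++ [word]) _ h1' h2']
      constructor
      · intro h w hw w2 hw2
        rcases List.mem_cons.mp hw with hw | hw
        · subst hw
          rcases hw2 with hw2 | hw2
          · exact Or.inr (hfresh w2 hw2)
          · rcases List.mem_cons.mp hw2 with hw2 | hw2
            · exact Or.inl hw2.symm
            · rcases h w2 hw2 w (Or.inl (by simp)) with he | hk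
              · exact Or.inl he.symm
              · exact Or.inr (Ne.symm hk)
        · refine h w hw w2 ?_
          rcases hw2 with hw2 | hw2
          · exact Or.inl (by simp [hw2])
          · rcases List.mem_cons.mp hw2 with hw2 | hw2
            · exact Or.inl (by simp [hw2])
            · exact Or.inr hw2
      · intro h w hw w2 hw2
        refine h w (List.mem_cons_of_mem _ hw) w2 ?_
        rcases hw2 with hw2 | hw2
        · rcases List.mem_append.mp hw2 with hw2 | hw2
          · exact Or.inl hw2
          · simp only [List.mem_singleton] at hw2
            subst hw2
            exact Or.inr (List.mem_cons_self ..)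
        · exact Or.inr (List.mem_cons_of_mem _ hw2)
    | some hit =>
      show (if hit ≠ word then false else pvScanB seen rest) = true ↔ _
      obtain ⟨hkey, hmem⟩ := h2 _ _ hget
      by_cases hh : hit = word
      · subst hh
        rw [if_neg (by simp)]
        rw [ih pre seen h1 h2]
        constructor
        · intro h w hw w2 hw2
          rcases List.mem_cons.mp hw with hw | hw
          · subst hw
            rcases hw2 with hw2 | hw2
            · by_cases hk : pvKeyB w = pvKeyB w2
              · have hx := h1 w2 hw2
                rw [← hk, hget] at hx
                exact Or.inl (Option.some_injective _ hx)
              · exact Or.inr hk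
            · rcases List.mem_cons.mp hw2 with hw2 | hw2
              · exact Or.inl hw2.symm
              · rcases h w2 hw2 w (Or.inl hmem) with he | hk
                · exact Or.inl he.symm
                · exact Or.inr (Ne.symm hk)
          · refine h w hw w2 ?_
            rcases hw2 with hw2 | hw2
            · exact Or.inl hw2
            · rcases List.mem_cons.mp hw2 with hw2 | hw2
              · exact Or.inl (hw2 ▸ hmem)
              · exact Or.inr hw2
        · intro h w hw w2 hw2
          refine h w (List.mem_cons_of_mem _ hw) w2 ?_
          rcases hw2 with hw2 | hw2
          · exact Or.inl hw2
          · exact Or.inr (List.mem_cons_of_mem _ hw2)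
      · rw [if_pos hh]
        constructor
        · intro h; cases h
        · intro h
          rcases h word (List.mem_cons_self ..) hit (Or.inl hmem) with he | hk
          · exact absurd he.symm hh
          · exact absurd hkey.symm hk

lemma B_iff (lista : List String) :
    is_really_valid_alt lista = true ↔
      ∀ w ∈ lista, ∀ w2 ∈ lista, w = w2 ∨ pvKeyB w ≠ pvKeyB w2 := by
  unfold is_really_valid_alt
  rw [scanB_iff lista [] PySem.Dict.empty (by simp)
      (by intro k v h; rw [PySem.Dict.get?_empty] at h; cases h)]
  constructor
  · intro h w hw w2 hw2; exact h w hw w2 (Or.inr hw2)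
  · intro h w hw w2 hw2
    rcases hw2 with hw2 | hw2
    · cases hw2
    · exact h w hw w2 hw2

-- ===== VERDICT (by name: the statement is the Claim_ definition above) =====
theorem is_really_valid_spec : Claim_equal_is_really_valid := by
  intro lista _
  unfold Spec_is_really_valid
  have := (A_iff lista).trans (B_iff lista).symm
  cases hA : is_really_valid lista <;> cases hB : is_really_valid_alt lista <;> simp_all
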